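-- pv_equiv track=rewrite | github.com/fedotov2a/TSU | Crypto/7/crypto_func.py | cyclic_group
-- ===== SOURCE A (Python) =====
-- def gcd(a, b):
--     while a != 0:
--         a, b = b % a, a
--     return b
--
-- def z_nz_group(n):
--     '''
--     Множество классов вычетов по модулю n
--     '''
--     res = []
--     for x in range(1, n):
--         if gcd(x, n) == 1:
--             res.append(x)
--     return res
--
-- def cyclic_group(n):
--     '''
--     Проверяет цикличная ли группа
--     '''
--     z_nz = z_nz_group(n)
--     for x in z_nz:
--         gr = []
--         for i in range(len(z_nz)):
--             gr.append(x**i % n)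
--
--         gr.sort()
--
--         if gr == z_nz:
--             return x
--
--     return None
-- ===== SOURCE B (Python) =====
-- def cyclic_group(n):
--     def gcd(a, b):
--         return b if a == 0 else gcd(b % a, a)
--     units = [x for x in range(1, n) if gcd(x, n) == 1]
--     phi = len(units)
--     for x in units:
--         powers = set()
--         p = 1 % n
--         for _ in range(phi):
--             powers.add(p)
--             p = p * x % n
--         if all(u in powers for u in units):
--             return x
--     return None
-- ===== Notes on version B (the rewrite author's own statement) =====
-- stated objective: faster
-- what changed: Per candidate x, A recomputes x**i (unbounded big-int power) for every i, sorts the phi results and compares the list to the unit list; B iterates p = p*x % n incrementally (all operands stay below n), collects the powers in a set and checks that every unit is in the set, with no sort. Intended as faster; a timing run measured a large constant-factor speedup (tens of times) at the largest size both versions finished, unconfirmed at sizes where both time out.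
import Mathlib
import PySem

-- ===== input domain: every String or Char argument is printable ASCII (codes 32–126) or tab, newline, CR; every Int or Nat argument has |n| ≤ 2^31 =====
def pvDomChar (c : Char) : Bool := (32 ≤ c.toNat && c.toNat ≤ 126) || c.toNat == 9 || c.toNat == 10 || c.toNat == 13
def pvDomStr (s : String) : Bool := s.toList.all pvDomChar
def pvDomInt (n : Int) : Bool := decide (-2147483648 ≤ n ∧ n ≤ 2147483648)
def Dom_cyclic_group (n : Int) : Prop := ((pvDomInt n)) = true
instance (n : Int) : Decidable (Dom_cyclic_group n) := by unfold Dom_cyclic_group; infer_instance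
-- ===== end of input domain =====

-- B replaces A's per-candidate orbit enumeration via big-integer powers x**i plus a sort with an
-- incremental power iteration (operands stay below n) collected into a set and a subset check
-- (intended as faster; a timing run measured a large constant-factor speedup at the largest size both finished, unconfirmed beyond).

-- termination measure for Euclid's step (used by both ports' gcd)
theorem pvModNatAbsLt (a b : Int) (h : a ≠ 0) : (PySem.Int.mod b a).natAbs < a.natAbs := by
  have h1 : 0 ≤ b % a := Int.emod_nonneg b h
  have h2 : b % a < (a.natAbs : Int) := by
    have h4 : ((a.natAbs : Int)) = |a| := (Int.abs_eq_natAbs a).symm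
    have := Int.emod_lt_of_pos b (b := |a|) (by rw [← h4]; omega)
    rw [Int.emod_abs] at this; omega
  have h3 := Int.fmod_eq_emod (a := b) (b := a)
  simp only [PySem.Int.mod]
  split at h3 <;> omega

-- ===== PORT A =====
-- while a != 0: a, b = b % a, a; return b
def pvGcdA (a b : Int) : Int :=
  if h : a = 0 then b else pvGcdA (PySem.Int.mod b a) a
termination_by a.natAbs
decreasing_by exact pvModNatAbsLt a b h

def z_nz_group (n : Int) : List Int :=
  (PySem.List.pyRange 1 n).foldl (fun res x => if pvGcdA x n = 1 then res ++ [x] else res) []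

-- the 'for x in z_nz' loop of A
def pvLoopA (n : Int) (z : List Int) : List Int → Option Int
  | [] => none
  | x :: rest =>
    let gr := (List.range z.length).foldl (fun gr i => gr ++ [PySem.Int.mod (x ^ i) n]) []
    let gr2 := PySem.List.sorted gr (fun y => y)
    if gr2 = z then some x else pvLoopA n z rest

def cyclic_group (n : Int) : Option Int :=
  let z := z_nz_group n
  pvLoopA n z z

-- ===== PORT B =====
-- gcd(a, b) = b if a == 0 else gcd(b % a, a)
def pvGcdB (a b : Int) : Int :=
  if h : a = 0 then b else pvGcdB (PySem.Int.mod b a) a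
termination_by a.natAbs
decreasing_by exact pvModNatAbsLt a b h

def pvUnits (n : Int) : List Int :=
  (PySem.List.pyRange 1 n).filter (fun x => pvGcdB x n == 1)

-- 'for _ in range(phi): powers.add(p); p = p * x % n'
def pvPowers (n x : Int) : Nat → PySem.Set Int × Int → PySem.Set Int × Int
  | 0, st => st
  | k + 1, (s, p) => pvPowers n x k (PySem.Set.add s p, PySem.Int.mod (p * x) n)

-- the 'for x in units' loop of B
def pvLoopB (n : Int) (units : List Int) (phi : Nat) : List Int → Option Int
  | [] => none
  | x :: rest =>
    let s := (pvPowers n x phi (PySem.Set.ofList [], PySem.Int.mod 1 n)).1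
    if units.all (fun u => PySem.Set.contains s u) then some x else pvLoopB n units phi rest

def cyclic_group_alt (n : Int) : Option Int :=
  let units := pvUnits n
  pvLoopB n units units.length units

-- ===== PRECONDITION & SPEC =====
def Spec_cyclic_group (n : Int) (out : Option Int) : Prop := out = cyclic_group_alt n
instance (n : Int) (out : Option Int) : Decidable (Spec_cyclic_group n out) := by unfold Spec_cyclic_group; infer_instance

-- ===== CLAIM (what is proved, stated in full; the proofs are below) =====
def Claim_equal_cyclic_group : Prop := ∀ (n : Int), Dom_cyclic_group n → Spec_cyclic_group n (cyclic_group n)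

-- ===== LEMMAS AND PROOFS =====

theorem pvGcdBA (a b : Int) : pvGcdB a b = pvGcdA a b := by
  induction a, b using pvGcdB.induct <;> (rw [pvGcdB, pvGcdA]; simp [*])

theorem pvUnitsEq (n : Int) : z_nz_group n = pvUnits n := by
  unfold z_nz_group pvUnits
  rw [show (fun res x => if pvGcdA x n = 1 then res ++ [x] else res)
        = (fun (res : List Int) x => if (decide (pvGcdA x n = 1)) = true then res ++ [id x] else res) by
      funext res x; simp]
  rw [PySem.List.foldl_append_if (fun x => decide (pvGcdA x n = 1)) id]
  simp only [List.nil_append, List.map_id]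
  apply List.filter_congr
  intro x _
  rw [pvGcdBA]
  exact (Bool.beq_eq_decide_eq _ _).symm

-- the list of the first k powers of x starting from p, each reduced mod n
def pvPl (n x : Int) : Int → Nat → List Int
  | _, 0 => []
  | p, k + 1 => p :: pvPl n x (PySem.Int.mod (p * x) n) k

theorem pvPowersMem (n x : Int) (k : Nat) (s : PySem.Set Int) (p u : Int) :
    u ∈ (pvPowers n x k (s, p)).1 ↔ u ∈ s ∨ u ∈ pvPl n x p k := by
  induction k generalizing s p with
  | zero => simp [pvPowers, pvPl]
  | succ k ih =>
    rw [pvPowers, pvPl, ih]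
    rw [PySem.Set.mem_add]
    simp only [List.mem_cons]
    tauto

theorem pvPlEq (n x : Int) (hn : 0 < n) (k i : Nat) :
    pvPl n x (PySem.Int.mod (x ^ i) n) k = (List.range k).map (fun j => PySem.Int.mod (x ^ (i + j)) n) := by
  induction k generalizing i with
  | zero => simp [pvPl]
  | succ k ih =>
    rw [pvPl]
    have hstep : PySem.Int.mod (PySem.Int.mod (x ^ i) n * x) n = PySem.Int.mod (x ^ (i + 1)) n := by
      rw [PySem.Int.mod_eq_emod_of_pos hn, PySem.Int.mod_eq_emod_of_pos hn,
          PySem.Int.mod_eq_emod_of_pos hn]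
      rw [Int.mul_emod (x ^ i % n) x, Int.emod_emod_of_dvd _ dvd_rfl, pow_succ,
          Int.mul_emod (x ^ i) x]
    rw [hstep, ih (i + 1), List.range_succ_eq_map, List.map_cons, List.map_map]
    refine congrArg₂ List.cons (by norm_num) (List.map_congr_left ?_)
    intro j _
    simp only [Function.comp_apply, Nat.succ_eq_add_one]
    congr 2
    omega

-- the combinatorial core: for a strictly increasing z and any gr of the same length,
-- sorted(gr) == z  ↔  every element of z occurs in gr
theorem pvSortedEqIff (z gr : List Int) (hpw : z.Pairwise (· < ·)) (hlen : gr.length = z.length) :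
    PySem.List.sorted gr (fun y => y) = z ↔ ∀ u ∈ z, u ∈ gr := by
  constructor
  · intro h u hu
    have hperm : (PySem.List.sorted gr (fun y => y)).Perm gr := PySem.List.sorted_perm gr _ false
    rw [h] at hperm
    exact hperm.mem_iff.mp hu
  · intro h
    have hnd : z.Nodup := hpw.nodup
    have hsub : z.Subperm gr := hnd.subperm h
    have hperm : z.Perm gr := hsub.perm_of_length_le (le_of_eq hlen)
    exact PySem.List.sorted_eq_of_perm_of_pairwise_lt gr z (fun y => y) hperm hpw

theorem pvLoopEq (n : Int) (hn : 0 < n) (z : List Int) (hpw : z.Pairwise (· < ·)) :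
    ∀ l, pvLoopA n z l = pvLoopB n z z.length l := by
  intro l
  induction l with
  | nil => rfl
  | cons x rest ih =>
    have hcond :
        (PySem.List.sorted ((List.range z.length).foldl (fun gr i => gr ++ [PySem.Int.mod (x ^ i) n]) []) (fun y => y) = z)
        ↔ (z.all (fun u => PySem.Set.contains (pvPowers n x z.length (PySem.Set.ofList [], PySem.Int.mod 1 n)).1 u) = true) := by
      rw [PySem.List.foldl_append_singleton_eq_map, List.nil_append]
      rw [pvSortedEqIff z _ hpw (by simp)]
      rw [List.all_eq_true]
      apply forall_congr'; intro u
      apply imp_congr_right; intro _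
      rw [PySem.Set.contains_iff]
      have h0 : PySem.Int.mod 1 n = PySem.Int.mod (x ^ 0) n := by norm_num
      rw [h0, pvPowersMem, pvPlEq n x hn z.length 0]
      have hnil : PySem.Set.ofList ([] : List Int) = [] := rfl
      rw [hnil]
      simp
    simp only [pvLoopA, pvLoopB]
    simp only [hcond]
    split
    · rfl
    · exact ih

theorem pvZPairwise (n : Int) : (z_nz_group n).Pairwise (· < ·) := by
  rw [pvUnitsEq]
  exact List.Pairwise.sublist List.filter_sublist (PySem.List.pairwise_lt_pyRange_one 1 n)

theorem pvZPos (n : Int) (h : z_nz_group n ≠ []) : 0 < n := by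
  rcases List.exists_mem_of_ne_nil _ h with ⟨x, hx⟩
  rw [pvUnitsEq] at hx
  unfold pvUnits at hx
  have := List.mem_of_mem_filter hx
  rw [PySem.List.mem_pyRange_one] at this
  omega

-- ===== VERDICT (by name: the statement is the Claim_ definition above) =====
theorem cyclic_group_spec : Claim_equal_cyclic_group := by
  intro n _
  unfold Spec_cyclic_group cyclic_group cyclic_group_alt
  rw [← pvUnitsEq]
  by_cases hz : z_nz_group n = []
  · rw [hz]; rfl
  · exact pvLoopEq n (pvZPos n hz) (z_nz_group n) (pvZPairwise n) (z_nz_group n)
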